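-- pv_equiv track=rewrite | github.com/miosync-masa/protein_ssoc | ssoc_v330.py | get_helix_position
-- ===== SOURCE A (Python) =====
-- def get_helix_position(ss_map, pos):
--     """Classify helix residue as 'cap' (terminal 2) or 'core' (interior)."""
--     srnums = sorted(ss_map.keys())
--     if ss_map.get(pos) != 'H': return 'none'
--     try: idx = srnums.index(pos)
--     except ValueError: return 'none'
--     left = idx
--     while left > 0 and ss_map.get(srnums[left-1]) == 'H': left -= 1
--     right = idx
--     while right < len(srnums)-1 and ss_map.get(srnums[right+1]) == 'H': right += 1
--     pos_in_helix = idx - left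
--     helix_len = right - left + 1
--     if pos_in_helix <= 1 or pos_in_helix >= helix_len - 2: return 'cap'
--     return 'core'
-- ===== SOURCE B (Python) =====
-- def get_helix_position(ss_map, pos):
--     """Classify helix residue as 'cap' (terminal 2) or 'core' (interior)."""
--     if ss_map.get(pos) != 'H':
--         return 'none'
--     # One O(n) pass: the two nearest keys below pos and the two nearest above.
--     p1 = p2 = n1 = n2 = None
--     for k in ss_map:
--         if k < pos:
--             if p1 is None or k > p1:
--                 p2 = p1
--                 p1 = k
--             elif p2 is None or k > p2:
--                 p2 = k
--         elif k > pos: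
--             if n1 is None or k < n1:
--                 n2 = n1
--                 n1 = k
--             elif n2 is None or k < n2:
--                 n2 = k
--     def is_h(k):
--         return k is not None and ss_map.get(k) == 'H'
--     if is_h(p1) and is_h(p2) and is_h(n1) and is_h(n2):
--         return 'core'
--     return 'cap'
-- ===== Notes on version B (the rewrite author's own statement) =====
-- stated objective: alternative
-- what changed: Instead of sorting all keys and walking the helix run left/right over the sorted array, B makes one pass over the dict that tracks only the two nearest keys below pos and the two nearest above, then classifies from those four lookups (core iff all four exist and are 'H').
import Mathlib
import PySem

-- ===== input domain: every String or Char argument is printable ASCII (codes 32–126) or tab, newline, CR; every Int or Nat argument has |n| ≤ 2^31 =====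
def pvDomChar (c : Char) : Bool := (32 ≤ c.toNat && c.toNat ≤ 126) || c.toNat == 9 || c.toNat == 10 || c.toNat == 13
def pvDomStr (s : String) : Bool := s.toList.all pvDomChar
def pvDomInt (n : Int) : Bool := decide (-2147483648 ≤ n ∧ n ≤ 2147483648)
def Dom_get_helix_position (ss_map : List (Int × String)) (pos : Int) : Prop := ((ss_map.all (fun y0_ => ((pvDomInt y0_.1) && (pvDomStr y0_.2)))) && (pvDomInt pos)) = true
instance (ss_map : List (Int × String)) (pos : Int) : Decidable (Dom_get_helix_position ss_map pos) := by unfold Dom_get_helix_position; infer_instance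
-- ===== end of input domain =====

-- B replaces A's full sort + helix-run walk by a single pass that keeps only the two
-- nearest keys on each side of pos (objective: alternative algorithm, no sort).

-- ===== PORT A =====
-- while left > 0 and ss_map.get(srnums[left-1]) == 'H': left -= 1
def leftLoopA (d : PySem.Dict Int String) (srnums : List Int) : Nat → Nat
  | 0 => 0
  | l + 1 => if d.get? (srnums.getD l 0) == some "H" then leftLoopA d srnums l else l + 1

-- while right < len(srnums)-1 and ss_map.get(srnums[right+1]) == 'H': right += 1
-- (second argument = len(srnums)-1-right, the number of steps still available)
def rightLoopA (d : PySem.Dict Int String) (srnums : List Int) : Nat → Nat → Nat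
  | r, 0 => r
  | r, fuel + 1 =>
      if d.get? (srnums.getD (r + 1) 0) == some "H" then rightLoopA d srnums (r + 1) fuel else r

def get_helix_position (ss_map : List (Int × String)) (pos : Int) : String :=
  let d := PySem.Dict.ofList ss_map
  let srnums := PySem.List.sorted (PySem.Dict.keys d) (fun x => x) false
  if d.get? pos ≠ some "H" then "none"
  else
    match PySem.List.index? srnums pos with
    | none => "none"
    | some idx =>
      let left := leftLoopA d srnums idx
      let right := rightLoopA d srnums idx (srnums.length - 1 - idx)
      let pos_in_helix : Int := (idx : Int) - (left : Int)
      let helix_len : Int := (right : Int) - (left : Int) + 1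
      if pos_in_helix ≤ 1 ∨ pos_in_helix ≥ helix_len - 2 then "cap" else "core"

-- ===== PORT B =====
-- one step of B's single pass: fold the key k into (p1, p2, n1, n2)
def bStep (pos : Int) (st : Option Int × Option Int × Option Int × Option Int) (k : Int) :
    Option Int × Option Int × Option Int × Option Int :=
  let (p1, p2, n1, n2) := st
  if k < pos then
    if p1.all (fun v => k > v) then (some k, p1, n1, n2)
    else if p2.all (fun v => k > v) then (p1, some k, n1, n2)
    else (p1, p2, n1, n2)
  else if k > pos then
    if n1.all (fun v => k < v) then (p1, p2, some k, n1)
    else if n2.all (fun v => k < v) then (p1, p2, n1, some k)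
    else (p1, p2, n1, n2)
  else (p1, p2, n1, n2)

def get_helix_position_alt (ss_map : List (Int × String)) (pos : Int) : String :=
  let d := PySem.Dict.ofList ss_map
  if d.get? pos ≠ some "H" then "none"
  else
    let st := (PySem.Dict.keys d).foldl (bStep pos) (none, none, none, none)
    let isH : Option Int → Bool := fun o => o.any (fun k => d.get? k == some "H")
    if isH st.1 && isH st.2.1 && isH st.2.2.1 && isH st.2.2.2 then "core" else "cap"

-- ===== PRECONDITION & SPEC =====
def Spec_get_helix_position (ss_map : List (Int × String)) (pos : Int) (out : String) : Prop := out = get_helix_position_alt ss_map pos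
instance (ss_map : List (Int × String)) (pos : Int) (out : String) : Decidable (Spec_get_helix_position ss_map pos out) := by unfold Spec_get_helix_position; infer_instance

-- ===== CLAIM (what is proved, stated in full; the proofs are below) =====
def Claim_equal_get_helix_position : Prop := ∀ (ss_map : List (Int × String)) (pos : Int), Dom_get_helix_position ss_map pos → Spec_get_helix_position ss_map pos (get_helix_position ss_map pos)

-- ===== LEMMAS AND PROOFS =====

-- A's left walk never moves right
theorem leftLoopA_le (d : PySem.Dict Int String) (s : List Int) :
    ∀ l, leftLoopA d s l ≤ l := by
  intro l
  induction l with
  | zero => simp [leftLoopA]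
  | succ l ih => simp only [leftLoopA]; split <;> omega

-- A's right walk never moves left
theorem rightLoopA_ge (d : PySem.Dict Int String) (s : List Int) :
    ∀ fuel r, r ≤ rightLoopA d s r fuel := by
  intro fuel
  induction fuel with
  | zero =>
    intro r
    simp [rightLoopA]
  | succ f ih =>
    intro r
    simp only [rightLoopA]
    split
    · exact le_trans (Nat.le_succ r) (ih (r + 1))
    · exact le_refl r

-- the left walk moves ≥ 2 steps iff the two sorted predecessors exist and are 'H'
theorem left2_iff (d : PySem.Dict Int String) (s : List Int) (idx : Nat) :
    2 ≤ idx - leftLoopA d s idx ↔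
      (2 ≤ idx ∧ (d.get? (s.getD (idx - 1) 0) == some "H") = true ∧
        (d.get? (s.getD (idx - 2) 0) == some "H") = true) := by
  match idx with
  | 0 =>
    simp [leftLoopA]
  | 1 =>
    constructor
    · intro hh
      exfalso
      have := leftLoopA_le d s 1
      omega
    · rintro ⟨h2, -, -⟩
      exact absurd h2 (by omega)
  | (k + 2) =>
    have hle := leftLoopA_le d s k
    rw [show k + 2 - 1 = k + 1 from by omega, show k + 2 - 2 = k from by omega]
    simp only [leftLoopA]
    by_cases h1 : (d.get? (s.getD (k + 1) 0) == some "H") = true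
    · rw [if_pos h1]
      by_cases h2 : (d.get? (s.getD k 0) == some "H") = true
      · rw [if_pos h2]
        constructor
        · intro _
          exact ⟨by omega, h1, h2⟩
        · intro _
          omega
      · rw [if_neg h2]
        constructor
        · intro hh
          exfalso; omega
        · rintro ⟨-, -, hc⟩
          exact absurd hc h2
    · rw [if_neg h1]
      constructor
      · intro hh
        exfalso; omega
      · rintro ⟨-, hc, -⟩
        exact absurd hc h1

-- the right walk moves ≥ 2 steps iff the two sorted successors exist and are 'H'
theorem right2_iff (d : PySem.Dict Int String) (s : List Int) (r fuel : Nat) :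
    2 ≤ rightLoopA d s r fuel - r ↔
      (2 ≤ fuel ∧ (d.get? (s.getD (r + 1) 0) == some "H") = true ∧
        (d.get? (s.getD (r + 2) 0) == some "H") = true) := by
  match fuel with
  | 0 =>
    simp [rightLoopA]
  | 1 =>
    constructor
    · intro hh
      exfalso
      simp only [rightLoopA] at hh
      split at hh <;> omega
    · rintro ⟨h2, -, -⟩
      exact absurd h2 (by omega)
  | (f + 2) =>
    have hge := rightLoopA_ge d s f (r + 1 + 1)
    simp only [rightLoopA]
    by_cases h1 : (d.get? (s.getD (r + 1) 0) == some "H") = true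
    · rw [if_pos h1]
      by_cases h2 : (d.get? (s.getD (r + 1 + 1) 0) == some "H") = true
      · rw [if_pos h2]
        constructor
        · intro _
          exact ⟨by omega, h1, h2⟩
        · intro _
          omega
      · rw [if_neg h2]
        constructor
        · intro hh
          exfalso; omega
        · rintro ⟨-, -, hc⟩
          exact absurd hc h2
    · rw [if_neg h1]
      constructor
      · intro hh
        exfalso; omega
      · rintro ⟨-, hc, -⟩
        exact absurd hc h1

-- proof-side views of B's single fold step
def pStep (pq : Option Int × Option Int) (k : Int) : Option Int × Option Int :=
  if pq.1.all (fun v => k > v) then (some k, pq.1)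
  else if pq.2.all (fun v => k > v) then (pq.1, some k)
  else pq

def nStep (pq : Option Int × Option Int) (k : Int) : Option Int × Option Int :=
  if pq.1.all (fun v => k < v) then (some k, pq.1)
  else if pq.2.all (fun v => k < v) then (pq.1, some k)
  else pq

theorem bStep_eq (pos k : Int) (p n : Option Int × Option Int) :
    bStep pos (p.1, p.2, n.1, n.2) k =
      if k < pos then ((pStep p k).1, (pStep p k).2, n.1, n.2)
      else if pos < k then (p.1, p.2, (nStep n k).1, (nStep n k).2)
      else (p.1, p.2, n.1, n.2) := by
  simp only [bStep, pStep, nStep]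
  split_ifs <;> rfl

theorem foldl_bStep (pos : Int) (l : List Int) (p n : Option Int × Option Int) :
    l.foldl (bStep pos) (p.1, p.2, n.1, n.2) =
      (((l.filter (fun k => decide (k < pos))).foldl pStep p).1,
       ((l.filter (fun k => decide (k < pos))).foldl pStep p).2,
       ((l.filter (fun k => decide (pos < k))).foldl nStep n).1,
       ((l.filter (fun k => decide (pos < k))).foldl nStep n).2) := by
  induction l generalizing p n with
  | nil => simp
  | cons k t ih =>
    rcases lt_trichotomy k pos with h | h | h
    · rw [List.foldl_cons, bStep_eq, if_pos h, ih (pStep p k) n]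
      simp [h, not_lt_of_gt h]
    · subst h
      rw [List.foldl_cons, bStep_eq, if_neg (lt_irrefl k), if_neg (lt_irrefl k), ih p n]
      simp
    · rw [List.foldl_cons, bStep_eq, if_neg (by omega), if_pos h, ih p (nStep n k)]
      simp [h, not_lt_of_gt h]

theorem pStep_rcomm (st : Option Int × Option Int) (a b : Int) :
    pStep (pStep st a) b = pStep (pStep st b) a := by
  rcases st with ⟨p1, p2⟩
  rcases p1 with _ | x <;> rcases p2 with _ | y <;>
    simp [pStep] <;> split_ifs <;> simp_all <;> omega

theorem nStep_rcomm (st : Option Int × Option Int) (a b : Int) :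
    nStep (nStep st a) b = nStep (nStep st b) a := by
  rcases st with ⟨p1, p2⟩
  rcases p1 with _ | x <;> rcases p2 with _ | y <;>
    simp [nStep] <;> split_ifs <;> simp_all <;> omega

-- folding pStep over a strictly increasing list keeps its two largest (= two last) elements
theorem pfold_sorted (L : List Int) (h : L.Pairwise (· < ·)) :
    L.foldl pStep (none, none) = (L.reverse.head?, L.reverse.tail.head?) := by
  induction L using List.reverseRecOn with
  | nil => rfl
  | append_singleton L a ih =>
    rw [List.pairwise_append] at h
    obtain ⟨hL, -, hcross⟩ := h
    rw [List.foldl_append, List.foldl_cons, List.foldl_nil, ih hL]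
    rcases hLr : L.reverse with _ | ⟨x, xs⟩
    · simp [pStep, hLr]
    · have hxL : x ∈ L := by
        have : x ∈ L.reverse := by rw [hLr]; exact List.mem_cons_self ..
        simpa using this
      have hxa : x < a := hcross x hxL a (List.mem_cons_self ..)
      simp [pStep, hLr, hxa]

theorem nfold_frozen (t : List Int) (a b : Int) (h : ∀ x ∈ t, a < x ∧ b < x) :
    t.foldl nStep (some a, some b) = (some a, some b) := by
  induction t with
  | nil => rfl
  | cons x xs ih =>
    have hx := h x (List.mem_cons_self ..)
    rw [List.foldl_cons]
    have hstep : nStep (some a, some b) x = (some a, some b) := by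
      have c1 : ¬ (x < a) := by omega
      have c2 : ¬ (x < b) := by omega
      simp [nStep, c1, c2]
    rw [hstep]
    exact ih (fun y hy => h y (List.mem_cons_of_mem _ hy))

-- folding nStep over a strictly increasing list keeps its two smallest (= two first) elements
theorem nfold_sorted (R : List Int) (h : R.Pairwise (· < ·)) :
    R.foldl nStep (none, none) = (R.head?, R.tail.head?) := by
  rcases R with _ | ⟨a, _ | ⟨b, t⟩⟩
  · rfl
  · simp [nStep]
  · rw [List.pairwise_cons] at h
    obtain ⟨ha, h⟩ := h
    rw [List.pairwise_cons] at h
    obtain ⟨hb, -⟩ := h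
    have hab : a < b := ha b (List.mem_cons_self ..)
    rw [List.foldl_cons, List.foldl_cons]
    have h1 : nStep (none, none) a = (some a, none) := by simp [nStep]
    have h2 : nStep (some a, none) b = (some a, some b) := by
      have c1 : ¬ (b < a) := by omega
      simp [nStep, c1]
    rw [h1, h2, nfold_frozen]
    · rfl
    · intro x hx
      exact ⟨ha x (List.mem_cons_of_mem _ hx), hb x hx⟩

-- "the first two elements exist and satisfy P" as a pair of option checks
theorem first_two (R : List Int) (P : Int → Bool) :
    (2 ≤ R.length ∧ P (R.getD 0 0) = true ∧ P (R.getD 1 0) = true) ↔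
      (R.head?.any P && R.tail.head?.any P) = true := by
  rcases R with _ | ⟨a, _ | ⟨b, t⟩⟩
  · simp
  · simp
  · simp only [List.getD_cons_zero, List.getD_cons_succ, List.head?_cons, List.tail_cons,
      Option.any_some, Bool.and_eq_true]
    constructor
    · rintro ⟨-, ha, hb⟩
      exact ⟨ha, hb⟩
    · rintro ⟨ha, hb⟩
      exact ⟨by simp, ha, hb⟩

theorem rev_getD (L : List Int) (i : Nat) (h : i < L.length) :
    L.reverse.getD i 0 = L.getD (L.length - 1 - i) 0 := by
  rw [List.getD_eq_getElem _ _ (by simpa using h), List.getD_eq_getElem _ _ (by omega),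
    List.getElem_reverse]

-- "the last two elements exist and satisfy P" as a pair of option checks
theorem last_two (L : List Int) (P : Int → Bool) :
    (2 ≤ L.length ∧ P (L.getD (L.length - 1) 0) = true ∧ P (L.getD (L.length - 2) 0) = true) ↔
      (L.reverse.head?.any P && L.reverse.tail.head?.any P) = true := by
  rw [← first_two L.reverse P]
  constructor
  · rintro ⟨h2, ha, hb⟩
    refine ⟨by simpa using h2, ?_, ?_⟩
    · rw [rev_getD L 0 (by omega)]
      simpa using ha
    · rw [rev_getD L 1 (by omega)]
      exact hb
  · rintro ⟨h2, ha, hb⟩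
    have h2' : 2 ≤ L.length := by simpa using h2
    rw [rev_getD L 0 (by omega)] at ha
    rw [rev_getD L 1 (by omega)] at hb
    refine ⟨h2', by simpa using ha, hb⟩

theorem main_eq (ss_map : List (Int × String)) (pos : Int) :
    get_helix_position ss_map pos = get_helix_position_alt ss_map pos := by
  unfold get_helix_position get_helix_position_alt
  dsimp only
  by_cases hH : (PySem.Dict.ofList ss_map).get? pos = some "H"
  case neg => rw [if_pos hH, if_pos hH]
  case pos =>
  rw [if_neg (not_not_intro hH), if_neg (not_not_intro hH)]
  set d := PySem.Dict.ofList ss_map with hd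
  set s := PySem.List.sorted (PySem.Dict.keys d) (fun x => x) false with hsdef
  have hndK : (PySem.Dict.keys d).Nodup := PySem.Dict.nodup_keys_ofList ss_map
  have hmemK : pos ∈ PySem.Dict.keys d := by
    by_contra hc
    rw [(PySem.Dict.get?_eq_none_iff_not_mem_keys d pos).2 hc] at hH
    simp at hH
  have hperm : s.Perm (PySem.Dict.keys d) := PySem.List.sorted_perm _ _ _
  have hmems : pos ∈ s := hperm.mem_iff.2 hmemK
  obtain ⟨idx, hidx⟩ := Option.isSome_iff_exists.1 ((PySem.List.index?_isSome_iff s pos).2 hmems)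
  obtain ⟨L, R, hsplit, hlen, -⟩ := (PySem.List.index?_eq_some_iff s pos idx).1 hidx
  subst hlen
  rw [hidx]
  dsimp only
  -- strict sortedness of s and its split
  have hnds : s.Nodup := hperm.nodup_iff.mpr hndK
  have hlts : s.Pairwise (· < ·) :=
    ((PySem.List.sorted_pairwise (PySem.Dict.keys d) (fun x => x)).and hnds).imp
      (fun hp => lt_of_le_of_ne hp.1 hp.2)
  have hlts' := hlts
  rw [hsplit, List.pairwise_append] at hlts'
  obtain ⟨hLp, hPR, hcross⟩ := hlts'
  rw [List.pairwise_cons] at hPR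
  obtain ⟨hRgt, hRp⟩ := hPR
  have hLlt : ∀ x ∈ L, x < pos := fun x hx => hcross x hx pos (List.mem_cons_self ..)
  -- the fuel of the right walk is the number of keys above pos
  have hfuel : s.length - 1 - L.length = R.length := by
    rw [hsplit]
    simp only [List.length_append, List.length_cons]
    omega
  rw [hfuel]
  -- A-side: replace the Int test by the Nat "walked ≥ 2 on both sides" condition
  have hlle := leftLoopA_le d s L.length
  have hrge := rightLoopA_ge d s R.length L.length
  have hAcond : ((L.length : Int) - (leftLoopA d s L.length : Int) ≤ 1 ∨
      (L.length : Int) - (leftLoopA d s L.length : Int) ≥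
        ((rightLoopA d s L.length R.length : Int) - (leftLoopA d s L.length : Int) + 1) - 2) ↔
      ¬ (2 ≤ L.length - leftLoopA d s L.length ∧
         2 ≤ rightLoopA d s L.length R.length - L.length) := by
    omega
  rw [if_congr hAcond rfl rfl]
  -- B-side: evaluate the fold
  rw [foldl_bStep pos (PySem.Dict.keys d) (none, none) (none, none)]
  have hpermL : ((PySem.Dict.keys d).filter (fun k => decide (k < pos))).Perm L := by
    have hfL : s.filter (fun k => decide (k < pos)) = L := by
      rw [hsplit, List.filter_append]
      have h0 : L.filter (fun k => decide (k < pos)) = L :=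
        List.filter_eq_self.2 (fun x hx => by simpa using hLlt x hx)
      have h1 : (pos :: R).filter (fun k => decide (k < pos)) = [] := by
        apply List.filter_eq_nil_iff.2
        intro x hx
        simp only [decide_eq_true_eq]
        rcases List.mem_cons.1 hx with h | h
        · subst h; omega
        · have := hRgt x h; omega
      rw [h0, h1, List.append_nil]
    have hpf := List.Perm.filter (fun k => decide (k < pos)) hperm.symm
    rwa [hfL] at hpf
  have hpermR : ((PySem.Dict.keys d).filter (fun k => decide (pos < k))).Perm R := by
    have hfR : s.filter (fun k => decide (pos < k)) = R := by
      rw [hsplit, List.filter_append]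
      have h0 : L.filter (fun k => decide (pos < k)) = [] := by
        apply List.filter_eq_nil_iff.2
        intro x hx
        simp only [decide_eq_true_eq]
        have := hLlt x hx
        omega
      have h1 : (pos :: R).filter (fun k => decide (pos < k)) = R := by
        rw [List.filter_cons]
        have hpp : (decide (pos < pos)) = false := by simp
        rw [hpp]
        simp only [Bool.false_eq_true, if_false]
        exact List.filter_eq_self.2 (fun x hx => by simpa using hRgt x hx)
      rw [h0, h1, List.nil_append]
    have hpf := List.Perm.filter (fun k => decide (pos < k)) hperm.symm
    rwa [hfR] at hpf
  have hPL : ((PySem.Dict.keys d).filter (fun k => decide (k < pos))).foldl pStep (none, none)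
      = (L.reverse.head?, L.reverse.tail.head?) := by
    rw [@List.Perm.foldl_eq _ _ pStep _ _ ⟨pStep_rcomm⟩ hpermL (none, none)]
    exact pfold_sorted L hLp
  have hNR : ((PySem.Dict.keys d).filter (fun k => decide (pos < k))).foldl nStep (none, none)
      = (R.head?, R.tail.head?) := by
    rw [@List.Perm.foldl_eq _ _ nStep _ _ ⟨nStep_rcomm⟩ hpermR (none, none)]
    exact nfold_sorted R hRp
  rw [hPL, hNR]
  dsimp only
  -- the in-range reads of A's left walk land in L …
  have hgd : 2 ≤ L.length →
      s.getD (L.length - 1) 0 = L.getD (L.length - 1) 0 ∧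
      s.getD (L.length - 2) 0 = L.getD (L.length - 2) 0 := by
    intro h2
    constructor
    · rw [hsplit]; exact List.getD_append _ _ _ _ (by omega)
    · rw [hsplit]; exact List.getD_append _ _ _ _ (by omega)
  -- … and those of its right walk in R
  have hr1 : s.getD (L.length + 1) 0 = R.getD 0 0 := by
    rw [hsplit, List.getD_append_right _ _ _ _ (by omega),
      show L.length + 1 - L.length = 1 from by omega]
    simp
  have hr2 : s.getD (L.length + 2) 0 = R.getD 1 0 := by
    rw [hsplit, List.getD_append_right _ _ _ _ (by omega),
      show L.length + 2 - L.length = 2 from by omega]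
    simp
  have hiff : (2 ≤ L.length - leftLoopA d s L.length ∧
      2 ≤ rightLoopA d s L.length R.length - L.length) ↔
      ((L.reverse.head?.any (fun k => d.get? k == some "H") &&
        L.reverse.tail.head?.any (fun k => d.get? k == some "H") &&
        R.head?.any (fun k => d.get? k == some "H") &&
        R.tail.head?.any (fun k => d.get? k == some "H")) = true) := by
    rw [left2_iff, right2_iff, hr1, hr2]
    constructor
    · rintro ⟨⟨h2, ha, hb⟩, ⟨h2r, hc, hd'⟩⟩
      obtain ⟨e1, e2⟩ := hgd h2
      rw [e1] at ha
      rw [e2] at hb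
      have hl := (last_two L (fun k => d.get? k == some "H")).1 ⟨h2, ha, hb⟩
      have hr := (first_two R (fun k => d.get? k == some "H")).1 ⟨h2r, hc, hd'⟩
      simp only [Bool.and_eq_true] at hl hr ⊢
      exact ⟨⟨⟨hl.1, hl.2⟩, hr.1⟩, hr.2⟩
    · intro h
      simp only [Bool.and_eq_true] at h
      obtain ⟨⟨⟨hx, hy⟩, hz⟩, hw⟩ := h
      obtain ⟨h2, ha, hb⟩ := (last_two L (fun k => d.get? k == some "H")).2
        (by simp only [Bool.and_eq_true]; exact ⟨hx, hy⟩)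
      obtain ⟨h2r, hc, hd'⟩ := (first_two R (fun k => d.get? k == some "H")).2
        (by simp only [Bool.and_eq_true]; exact ⟨hz, hw⟩)
      obtain ⟨e1, e2⟩ := hgd h2
      rw [← e1] at ha
      rw [← e2] at hb
      exact ⟨⟨h2, ha, hb⟩, ⟨h2r, hc, hd'⟩⟩
  by_cases hca : (2 ≤ L.length - leftLoopA d s L.length ∧
      2 ≤ rightLoopA d s L.length R.length - L.length)
  · rw [if_neg (not_not_intro hca), if_pos (hiff.1 hca)]
  · rw [if_pos hca, if_neg (fun h => hca (hiff.2 h))]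

-- ===== VERDICT (by name: the statement is the Claim_ definition above) =====
theorem get_helix_position_spec : Claim_equal_get_helix_position := by
  intro ss_map pos _
  unfold Spec_get_helix_position
  exact main_eq ss_map pos
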